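-- pv_equiv track=rewrite | github.com/rebryant/model-counting | crat/prototype/crat_checker.py | cleanClause
-- ===== SOURCE A (Python) =====
-- def cleanClause(literalList):
--     slist = sorted(literalList, key = lambda v: -abs(v))
--     if len(slist) <= 1:
--         return slist
--     nlist = [slist[0]]
--     for i in range(1, len(slist)):
--         if slist[i-1] == slist[i]:
--             continue
--         if slist[i-1] == -slist[i]:
--             return None
--         nlist.append(slist[i])
--     return nlist
-- ===== SOURCE B (Python) =====
-- def cleanClause(literalList):
--     seen = set()
--     for v in literalList:
--         if v in seen:
--             continue
--         if -v in seen: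
--             return None
--         seen.add(v)
--     return sorted(seen, key=lambda v: -abs(v))
-- ===== Notes on version B (the rewrite author's own statement) =====
-- stated objective: faster
-- what changed: B detects duplicates and tautologies in one pass over the original list via a set of already-seen literals (checking dup before negation so repeated 0 stays a duplicate), and sorts only the surviving distinct literals once at the end, instead of A's sort-the-whole-list-then-scan-adjacent-pairs.
import Mathlib
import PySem

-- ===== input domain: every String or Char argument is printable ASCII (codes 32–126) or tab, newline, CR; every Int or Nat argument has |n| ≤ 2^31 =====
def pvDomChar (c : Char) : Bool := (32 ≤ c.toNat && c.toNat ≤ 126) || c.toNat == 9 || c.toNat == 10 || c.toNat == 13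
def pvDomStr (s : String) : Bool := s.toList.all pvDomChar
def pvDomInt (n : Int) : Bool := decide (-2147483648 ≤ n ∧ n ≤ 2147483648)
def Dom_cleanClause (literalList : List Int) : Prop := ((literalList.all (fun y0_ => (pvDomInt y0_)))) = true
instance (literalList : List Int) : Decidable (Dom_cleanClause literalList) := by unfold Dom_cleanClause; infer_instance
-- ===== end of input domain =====

-- B replaces A's sort-then-scan-adjacent-pairs with a single pass over the original list using a
-- set of seen literals (dup checked before negation) followed by one sort of only the distinct
-- literals; objective: faster (the sort runs on the deduplicated list; measured).

-- ===== PORT A =====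
-- the loop 'for i in range(1, len(slist))' comparing slist[i-1] with slist[i]:
-- structural recursion over the tail with prev = slist[i-1], nlist the accumulator
def cleanClauseGoA (prev : Int) (nlist : List Int) : List Int → Option (List Int)
  | [] => some nlist
  | x :: xs =>
      if prev = x then cleanClauseGoA x nlist xs
      else if prev = -x then none
      else cleanClauseGoA x (nlist ++ [x]) xs

def cleanClause (literalList : List Int) : Option (List Int) :=
  match PySem.List.sorted literalList (fun v => -|v|) with
  | [] => some []                      -- len(slist) <= 1: return slist
  | [a] => some [a]                    -- len(slist) <= 1: return slist
  | h :: t => cleanClauseGoA h [h] t   -- nlist = [slist[0]]; loop from i = 1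

-- ===== PORT B =====
def cleanClauseGoB (seen : PySem.Set Int) : List Int → Option (List Int)
  | [] => some (PySem.List.sorted seen (fun v => -|v|))
  | v :: vs =>
      if PySem.Set.contains seen v then cleanClauseGoB seen vs
      else if PySem.Set.contains seen (-v) then none
      else cleanClauseGoB (PySem.Set.add seen v) vs

def cleanClause_alt (literalList : List Int) : Option (List Int) :=
  cleanClauseGoB PySem.Set.empty literalList

-- ===== PRECONDITION & SPEC =====
def Spec_cleanClause (literalList : List Int) (out : Option (List Int)) : Prop := out = cleanClause_alt literalList
instance (literalList : List Int) (out : Option (List Int)) : Decidable (Spec_cleanClause literalList out) := by unfold Spec_cleanClause; infer_instance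

-- ===== CLAIM (what is proved, stated in full; the proofs are below) =====
def Claim_equal_cleanClause : Prop := ∀ (literalList : List Int), Dom_cleanClause literalList → Spec_cleanClause literalList (cleanClause literalList)

-- ===== LEMMAS AND PROOFS =====

-- "clause is a tautology": some nonzero literal appears with both signs
def pvTaut (l : List Int) : Prop := ∃ v ∈ l, v ≠ 0 ∧ -v ∈ l

-- ---- B-side characterization ----

theorem contains_iff_mem (s : PySem.Set Int) (x : Int) :
    PySem.Set.contains s x = true ↔ x ∈ s := by simp [PySem.Set.contains]

theorem goB_char (l : List Int) : ∀ (seen : PySem.Set Int),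
    (∀ a ∈ seen, a ≠ 0 → -a ∉ seen) →
    cleanClauseGoB seen l =
      if ∃ v ∈ l, v ≠ 0 ∧ (-v ∈ seen ∨ -v ∈ l) then none
      else some (PySem.List.sorted (PySem.Set.update seen l) (fun v => -|v|)) := by
  induction l with
  | nil => intro seen h; simp [cleanClauseGoB, PySem.Set.update]
  | cons v vs ih =>
    intro seen h
    by_cases hv : v ∈ seen
    · rw [cleanClauseGoB, if_pos ((contains_iff_mem _ _).mpr hv), ih seen h]
      have hupd : PySem.Set.update seen (v :: vs) = PySem.Set.update seen vs := by
        simp [PySem.Set.update, PySem.Set.add, PySem.Set.contains, hv]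
      have hiff : (∃ u ∈ v :: vs, u ≠ 0 ∧ (-u ∈ seen ∨ -u ∈ v :: vs)) ↔
          (∃ u ∈ vs, u ≠ 0 ∧ (-u ∈ seen ∨ -u ∈ vs)) := by
        constructor
        · rintro ⟨u, hu, hu0, hcase⟩
          rcases List.mem_cons.mp hu with rfl | hu'
          · rcases hcase with hns | hnl
            · exact absurd hns (h u hv hu0)
            · rcases List.mem_cons.mp hnl with hh | htl
              · exact absurd hh.symm (by omega)
              · exact ⟨-u, htl, by omega, Or.inl (by simpa using hv)⟩
          · refine ⟨u, hu', hu0, ?_⟩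
            rcases hcase with hns | hnl
            · exact Or.inl hns
            · rcases List.mem_cons.mp hnl with hh | htl
              · exact Or.inl (by rw [hh]; exact hv)
              · exact Or.inr htl
        · rintro ⟨u, hu, hu0, hcase⟩
          exact ⟨u, List.mem_cons_of_mem _ hu, hu0,
            hcase.imp id (List.mem_cons_of_mem _)⟩
      by_cases hc : ∃ u ∈ vs, u ≠ 0 ∧ (-u ∈ seen ∨ -u ∈ vs)
      · rw [if_pos hc, if_pos (hiff.mpr hc)]
      · rw [if_neg hc, if_neg (fun hh => hc (hiff.mp hh)), hupd]
    · have hcv : ¬ PySem.Set.contains seen v = true := fun hh => hv ((contains_iff_mem _ _).mp hh)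
      by_cases hnv : (-v) ∈ seen
      · have hv0 : v ≠ 0 := by rintro rfl; simp at hnv; exact hv hnv
        rw [cleanClauseGoB, if_neg hcv, if_pos ((contains_iff_mem _ _).mpr hnv)]
        rw [if_pos ⟨v, List.mem_cons_self, hv0, Or.inl hnv⟩]
      · have hcnv : ¬ PySem.Set.contains seen (-v) = true :=
          fun hh => hnv ((contains_iff_mem _ _).mp hh)
        have hadd : PySem.Set.add seen v = seen ++ [v] := by
          simp [PySem.Set.add, PySem.Set.contains, hv]
        have h' : ∀ a ∈ PySem.Set.add seen v, a ≠ 0 → -a ∉ PySem.Set.add seen v := by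
          rw [hadd]
          intro a ha ha0 hna
          rcases List.mem_append.mp ha with ha | ha
          · rcases List.mem_append.mp hna with hb | hb
            · exact h a ha ha0 hb
            · simp at hb; exact hnv (by rw [show (-v) = a by omega]; exact ha)
          · simp at ha; subst ha
            rcases List.mem_append.mp hna with hb | hb
            · exact hnv hb
            · simp at hb; omega
        rw [cleanClauseGoB, if_neg hcv, if_neg hcnv, ih _ h']
        have hupd : PySem.Set.update seen (v :: vs) = PySem.Set.update (PySem.Set.add seen v) vs := by
          simp [PySem.Set.update]
        have hiff : (∃ u ∈ v :: vs, u ≠ 0 ∧ (-u ∈ seen ∨ -u ∈ v :: vs)) ↔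
            (∃ u ∈ vs, u ≠ 0 ∧ (-u ∈ PySem.Set.add seen v ∨ -u ∈ vs)) := by
          rw [hadd]
          constructor
          · rintro ⟨u, hu, hu0, hcase⟩
            rcases List.mem_cons.mp hu with rfl | hu'
            · rcases hcase with hns | hnl
              · exact absurd hns hnv
              · rcases List.mem_cons.mp hnl with hh | htl
                · exact absurd hh.symm (by omega)
                · exact ⟨-u, htl, by omega, Or.inl (by simp)⟩
            · refine ⟨u, hu', hu0, ?_⟩
              rcases hcase with hns | hnl
              · exact Or.inl (List.mem_append_left _ hns)
              · rcases List.mem_cons.mp hnl with hh | htl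
                · exact Or.inl (by rw [hh]; simp)
                · exact Or.inr htl
          · rintro ⟨u, hu, hu0, hcase⟩
            rcases hcase with hns | hnl
            · rcases List.mem_append.mp hns with hb | hb
              · exact ⟨u, List.mem_cons_of_mem _ hu, hu0, Or.inl hb⟩
              · simp at hb
                exact ⟨v, List.mem_cons_self, by omega,
                  Or.inr (List.mem_cons_of_mem _ (by rw [show -v = u by omega]; exact hu))⟩
            · exact ⟨u, List.mem_cons_of_mem _ hu, hu0,
                Or.inr (List.mem_cons_of_mem _ hnl)⟩
        by_cases hc : ∃ u ∈ vs, u ≠ 0 ∧ (-u ∈ PySem.Set.add seen v ∨ -u ∈ vs)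
        · rw [if_pos hc, if_pos (hiff.mpr hc)]
        · rw [if_neg hc, if_neg (fun hh => hc (hiff.mp hh)), hupd]

theorem pvTaut_perm {l1 l2 : List Int} (hp : l1.Perm l2) : pvTaut l1 ↔ pvTaut l2 := by
  unfold pvTaut
  constructor <;> rintro ⟨v, hv, hv0, hnv⟩
  · exact ⟨v, hp.mem_iff.mp hv, hv0, hp.mem_iff.mp hnv⟩
  · exact ⟨v, hp.mem_iff.mpr hv, hv0, hp.mem_iff.mpr hnv⟩

theorem alt_none (l : List Int) (ht : pvTaut l) : cleanClause_alt l = none := by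
  rw [cleanClause_alt, goB_char l PySem.Set.empty (by intro a ha; simp [PySem.Set.empty] at ha)]
  obtain ⟨v, hv, hv0, hnv⟩ := ht
  exact if_pos ⟨v, hv, hv0, Or.inr hnv⟩

theorem alt_some (l : List Int) (ht : ¬ pvTaut l) :
    cleanClause_alt l = some (PySem.List.sorted (PySem.List.dedup l) (fun v => -|v|)) := by
  rw [cleanClause_alt, goB_char l PySem.Set.empty (by intro a ha; simp [PySem.Set.empty] at ha)]
  rw [if_neg (by
    rintro ⟨v, hv, hv0, hcase⟩
    rcases hcase with hns | hnl
    · simp [PySem.Set.empty] at hns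
    · exact ht ⟨v, hv, hv0, hnl⟩)]
  rw [PySem.List.dedup_eq_ofList]
  rfl

-- ---- A-side characterization ----

theorem goA_none (rest : List Int) : ∀ (prev : Int) (nlist : List Int),
    List.Pairwise (fun a b => |b| ≤ |a|) (prev :: rest) →
    (cleanClauseGoA prev nlist rest = none ↔ pvTaut (prev :: rest)) := by
  induction rest with
  | nil =>
    intro prev nlist _
    simp only [cleanClauseGoA, pvTaut]
    constructor
    · intro h; cases h
    · rintro ⟨v, hv, hv0, hnv⟩
      simp at hv hnv; omega
  | cons x xs ih =>
    intro prev nlist hp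
    have hp' : List.Pairwise (fun a b => |b| ≤ |a|) (x :: xs) := hp.tail
    by_cases hx : prev = x
    · subst hx
      rw [cleanClauseGoA, if_pos rfl, ih prev nlist hp']
      unfold pvTaut
      constructor
      · rintro ⟨v, hv, hv0, hnv⟩
        exact ⟨v, List.mem_cons_of_mem _ hv, hv0, List.mem_cons_of_mem _ hnv⟩
      · rintro ⟨v, hv, hv0, hnv⟩
        refine ⟨v, ?_, hv0, ?_⟩ <;> simp_all
    · by_cases hnx : prev = -x
      · have hx0 : x ≠ 0 := by omega
        rw [cleanClauseGoA, if_neg hx, if_pos hnx]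
        simp only [true_iff]
        exact ⟨x, List.mem_cons_of_mem _ List.mem_cons_self, hx0,
          by rw [← hnx]; exact List.mem_cons_self⟩
      · rw [cleanClauseGoA, if_neg hx, if_neg hnx, ih x (nlist ++ [x]) hp']
        unfold pvTaut
        constructor
        · rintro ⟨v, hv, hv0, hnv⟩
          exact ⟨v, List.mem_cons_of_mem _ hv, hv0, List.mem_cons_of_mem _ hnv⟩
        · rintro ⟨v, hv, hv0, hnv⟩
          rcases List.mem_cons.mp hv with rfl | hv'
          · -- v = prev
            rcases List.mem_cons.mp hnv with hh | htl
            · exact absurd hh (by omega)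
            · rcases List.mem_cons.mp htl with hh2 | htl2
              · exact absurd (by omega : v = -x) hnx
              · -- -v ∈ xs: sortedness forces |x| = |v|, contradiction with hx/hnx
                exfalso
                have h1 : |x| ≤ |v| := (List.pairwise_cons.mp hp).1 x List.mem_cons_self
                have h2 : |(-v)| ≤ |x| := (List.pairwise_cons.mp hp').1 _ htl2
                rw [abs_neg] at h2
                have h3 : |x| = |v| := le_antisymm h1 h2
                rcases abs_eq_abs.mp h3 with h | h <;> omega
          · rcases List.mem_cons.mp hnv with hh | htl
            · -- -v = prev, v ∈ x :: xs
              rcases List.mem_cons.mp hv' with rfl | hv''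
              · exact absurd (by omega : prev = -v) hnx
              · exfalso
                have h1 : |x| ≤ |prev| := (List.pairwise_cons.mp hp).1 x List.mem_cons_self
                have h2 : |v| ≤ |x| := (List.pairwise_cons.mp hp').1 _ hv''
                have h4 : |prev| = |v| := by rw [← hh, abs_neg]
                rw [h4] at h1
                have h3 : |x| = |v| := le_antisymm h1 h2
                rcases abs_eq_abs.mp h3 with h | h <;> omega
            · exact ⟨v, hv', hv0, htl⟩

theorem goA_some (rest : List Int) : ∀ (prev : Int) (nlist R : List Int),
    List.Pairwise (fun a b => |b| ≤ |a|) (prev :: rest) →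
    List.Pairwise (fun a b => |b| < |a|) nlist →
    (∀ a ∈ nlist, |prev| ≤ |a|) →
    prev ∈ nlist →
    cleanClauseGoA prev nlist rest = some R →
    List.Pairwise (fun a b => |b| < |a|) R ∧ (∀ y, y ∈ R ↔ y ∈ nlist ∨ y ∈ rest) := by
  induction rest with
  | nil =>
    intro prev nlist R _ h2 _ _ hR
    simp only [cleanClauseGoA, Option.some.injEq] at hR
    subst hR
    exact ⟨h2, by simp⟩
  | cons x xs ih =>
    intro prev nlist R hp h2 h3 h4 hR
    have hp' : List.Pairwise (fun a b => |b| ≤ |a|) (x :: xs) := hp.tail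
    by_cases hx : prev = x
    · subst hx
      rw [cleanClauseGoA, if_pos rfl] at hR
      obtain ⟨hpw, hmem⟩ := ih prev nlist R hp' h2 h3 h4 hR
      refine ⟨hpw, fun y => ?_⟩
      rw [hmem y]
      constructor
      · rintro (h | h)
        · exact Or.inl h
        · exact Or.inr (List.mem_cons_of_mem _ h)
      · rintro (h | h)
        · exact Or.inl h
        · rcases List.mem_cons.mp h with rfl | h'
          · exact Or.inl h4
          · exact Or.inr h'
    · by_cases hnx : prev = -x
      · rw [cleanClauseGoA, if_neg hx, if_pos hnx] at hR; cases hR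
      · rw [cleanClauseGoA, if_neg hx, if_neg hnx] at hR
        have hxlt : ∀ a ∈ nlist, |x| < |a| := by
          intro a ha
          have h1 : |x| ≤ |prev| := (List.pairwise_cons.mp hp).1 x List.mem_cons_self
          have hne : |x| ≠ |prev| := by
            intro h; rcases abs_eq_abs.mp h with h | h <;> omega
          calc |x| < |prev| := lt_of_le_of_ne h1 hne
            _ ≤ |a| := h3 a ha
        have h2' : List.Pairwise (fun a b => |b| < |a|) (nlist ++ [x]) := by
          rw [List.pairwise_append]
          exact ⟨h2, List.pairwise_singleton _ _, fun a ha b hb => by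
            simp at hb; subst hb; exact hxlt a ha⟩
        have h3' : ∀ a ∈ nlist ++ [x], |x| ≤ |a| := by
          intro a ha
          rcases List.mem_append.mp ha with ha | ha
          · exact le_of_lt (hxlt a ha)
          · simp at ha; subst ha; rfl
        obtain ⟨hpw, hmem⟩ := ih x (nlist ++ [x]) R hp' h2' h3' (by simp) hR
        refine ⟨hpw, fun y => ?_⟩
        rw [hmem y]
        simp only [List.mem_append, List.mem_cons]
        tauto

theorem sorted_abs_pairwise (l : List Int) :
    List.Pairwise (fun a b => |b| ≤ |a|) (PySem.List.sorted l (fun v => -|v|)) :=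
  (PySem.List.sorted_pairwise l (fun v => -|v|)).imp (fun {a b} h => by omega)

theorem a_none (l : List Int) (ht : pvTaut l) : cleanClause l = none := by
  have hperm := PySem.List.sorted_perm l (fun v : Int => -|v|) false
  have hpw0 := sorted_abs_pairwise l
  unfold cleanClause
  cases hs : PySem.List.sorted l (fun v => -|v|) with
  | nil =>
    exfalso
    have hl : l = [] := (PySem.List.sorted_eq_nil_iff l _ false).mp hs
    subst hl
    obtain ⟨v, hv, _⟩ := ht
    cases hv
  | cons h t =>
    rw [hs] at hperm hpw0
    cases t with
    | nil =>
      exfalso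
      have hl : l = [h] := List.perm_singleton.mp hperm.symm
      subst hl
      obtain ⟨v, hv, hv0, hnv⟩ := ht
      simp at hv hnv; omega
    | cons x xs =>
      exact (goA_none (x :: xs) h [h] hpw0).mpr ((pvTaut_perm hperm).mpr ht)

theorem a_some (l : List Int) (ht : ¬ pvTaut l) :
    cleanClause l = some (PySem.List.sorted (PySem.List.dedup l) (fun v => -|v|)) := by
  have hperm := PySem.List.sorted_perm l (fun v : Int => -|v|) false
  have hpw0 := sorted_abs_pairwise l
  unfold cleanClause
  cases hs : PySem.List.sorted l (fun v => -|v|) with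
  | nil =>
    have hl : l = [] := (PySem.List.sorted_eq_nil_iff l _ false).mp hs
    subst hl
    rfl
  | cons h t =>
    rw [hs] at hperm hpw0
    cases t with
    | nil =>
      have hl : l = [h] := List.perm_singleton.mp hperm.symm
      subst hl
      have hd : PySem.List.dedup [h] = [h] := by
        rw [PySem.List.dedup_eq_ofList]; rfl
      rw [hd]
      rw [PySem.List.sorted_eq_of_perm_of_pairwise_lt [h] [h] _ (List.Perm.refl _)
        (List.pairwise_singleton _ _)]
    | cons x xs =>
      have hnone : cleanClauseGoA h [h] (x :: xs) ≠ none := fun hn =>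
        ht ((pvTaut_perm hperm).mp ((goA_none (x :: xs) h [h] hpw0).mp hn))
      obtain ⟨R, hR⟩ := Option.ne_none_iff_exists'.mp hnone
      show cleanClauseGoA h [h] (x :: xs) = _
      rw [hR]
      obtain ⟨hpwR, hmemR⟩ := goA_some (x :: xs) h [h] R hpw0
        (List.pairwise_singleton _ _) (by simp) (by simp) hR
      have hmem : ∀ y, y ∈ R ↔ y ∈ l := by
        intro y
        rw [hmemR y, ← hperm.mem_iff]
        simp [List.mem_cons, or_comm]
      have hnodupR : R.Nodup := hpwR.imp (fun {a b} hab => by intro h; subst h; omega)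
      have hpermR : R.Perm (PySem.List.dedup l) := by
        rw [List.perm_ext_iff_of_nodup hnodupR (by
          rw [PySem.List.dedup_eq_ofList]; exact PySem.Set.nodup_ofList l)]
        intro a
        rw [hmem a, PySem.List.dedup_eq_ofList, PySem.Set.mem_ofList]
      congr 1
      exact (PySem.List.sorted_eq_of_perm_of_pairwise_lt (PySem.List.dedup l) R _ hpermR
        (hpwR.imp (fun {a b} hab => by omega))).symm

-- ===== VERDICT (by name: the statement is the Claim_ definition above) =====
theorem cleanClause_spec : Claim_equal_cleanClause := by
  intro l _
  unfold Spec_cleanClause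
  by_cases ht : pvTaut l
  · rw [a_none l ht, alt_none l ht]
  · rw [a_some l ht, alt_some l ht]
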